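-- pv_equiv track=rewrite | github.com/CASY82/CHH_StudyRoom | Algo/implements/Baek_28125_X.py | process_word
-- ===== SOURCE A (Python) =====
-- rules = {
--     '@': 'a',
--     '[': 'c',
--     '!': 'i',
--     ';': 'j',
--     '^': 'n',
--     '0': 'o',
--     '7': 't',
--     '\\\'': 'v',  # \'
--     '\\\\\'': 'w' # \\'
-- }
--
-- def process_word(word):
--     alphabet_count = 0  # 원래 소문자 + 바뀐 문자
--     changed_count = 0   # 바뀐 문자 개수
--     original = []       # 복원된 단어
--     i = 0               # 문자열 인덱스
--
--     while i < len(word):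
--         # \\' (w) 패턴 확인 (3글자)
--         if i + 2 < len(word) and word[i:i+3] == '\\\\\'':
--             alphabet_count += 1
--             changed_count += 1
--             original.append('w')
--             i += 3
--         # \' (v) 패턴 확인 (2글자)
--         elif i + 1 < len(word) and word[i:i+2] == '\\\'':
--             alphabet_count += 1
--             changed_count += 1
--             original.append('v')
--             i += 2
--         # 단일 문자 확인
--         else:
--             char = word[i]
--             # rules에 있는 단일 문자
--             if char in rules:
--                 alphabet_count += 1
--                 changed_count += 1
--                 original.append(rules[char])
--             # 소문자
--             elif char.islower():
--                 alphabet_count += 1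
--                 original.append(char)
--             # 그 외 문자 (소문자도 바뀐 문자도 아님)
--             else:
--                 original.append(char)
--             i += 1
--
--     # 바뀐 문자가 절반 초과인지 확인
--     if alphabet_count > 0 and changed_count * 2 >= alphabet_count:
--         return "I don't understand"
--     else:
--         return ''.join(original)
-- ===== SOURCE B (Python) =====
-- rules = {
--     '@': 'a',
--     '[': 'c',
--     '!': 'i',
--     ';': 'j',
--     '^': 'n',
--     '0': 'o',
--     '7': 't',
--     '\\\'': 'v',  # \'
--     '\\\\\'': 'w' # \\'
-- }
--
-- def process_word(word):
--     # single-pass character DFA: p = number of pending backslashes (0..2)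
--     out = []
--     alpha = 0
--     chg = 0
--     p = 0
--     for c in word:
--         if c == '\\':
--             if p == 2:
--                 out.append('\\')
--             else:
--                 p += 1
--         elif c == "'" and p > 0:
--             out.append('w' if p == 2 else 'v')
--             alpha += 1
--             chg += 1
--             p = 0
--         else:
--             out.extend('\\' * p)
--             p = 0
--             if c in rules:
--                 out.append(rules[c])
--                 alpha += 1
--                 chg += 1
--             elif c.islower():
--                 out.append(c)
--                 alpha += 1
--             else:
--                 out.append(c)
--     out.extend('\\' * p)
--     if alpha > 0 and 2 * chg >= alpha:
--         return "I don't understand"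
--     return ''.join(out)
-- ===== Notes on version B (the rewrite author's own statement) =====
-- stated objective: alternative
-- what changed: A's index-and-slice scan with 3-char/2-char lookahead is replaced by a single-pass character automaton that keeps a pending-backslash counter and flushes it at token boundaries.
import Mathlib
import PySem

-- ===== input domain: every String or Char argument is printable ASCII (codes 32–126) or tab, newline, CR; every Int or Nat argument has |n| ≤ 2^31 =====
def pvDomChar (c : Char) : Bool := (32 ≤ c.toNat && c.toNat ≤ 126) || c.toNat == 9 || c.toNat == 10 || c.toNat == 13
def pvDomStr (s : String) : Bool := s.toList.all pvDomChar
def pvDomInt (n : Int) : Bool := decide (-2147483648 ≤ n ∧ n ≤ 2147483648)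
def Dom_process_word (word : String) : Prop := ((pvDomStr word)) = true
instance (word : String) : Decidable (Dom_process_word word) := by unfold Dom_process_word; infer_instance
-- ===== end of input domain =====

-- B replaces A's index-and-slice lookahead scan by a single-pass character automaton
-- (a pending-backslash counter); objective: alternative decomposition, same cost.

-- ===== PORT A =====
-- module-level dict `rules` (shared context of both Pythons)
def pvRules : PySem.Dict String String :=
  PySem.Dict.ofList [("@","a"),("[","c"),("!","i"),(";","j"),("^","n"),("0","o"),("7","t"),("\\'","v"),("\\\\'","w")]

-- A's while loop over the index, transliterated as recursion on the remaining
-- characters: the two slice comparisons word[i:i+3]=="\\'" / word[i:i+2]="\'"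
-- become the corresponding head patterns (the i+2<len / i+1<len guards are exactly
-- "three / two characters remain"); returns (alphabet_count, changed_count, original).
def pvLoopA : List Char → Int × Int × List Char
  | '\\' :: '\\' :: '\'' :: rest =>
      let r := pvLoopA rest; (r.1 + 1, r.2.1 + 1, 'w' :: r.2.2)
  | '\\' :: '\'' :: rest =>
      let r := pvLoopA rest; (r.1 + 1, r.2.1 + 1, 'v' :: r.2.2)
  | c :: rest =>
      let r := pvLoopA rest
      match pvRules.get? (String.ofList [c]) with   -- char in rules / rules[char]
      | some v => (r.1 + 1, r.2.1 + 1, v.toList ++ r.2.2)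
      | none =>
        if PySem.Chars.islower c then (r.1 + 1, r.2.1, c :: r.2.2)
        else (r.1, r.2.1, c :: r.2.2)
  | [] => (0, 0, [])

def process_word (word : String) : String :=
  let r := pvLoopA word.toList
  if r.1 > 0 ∧ r.2.1 * 2 ≥ r.1 then "I don't understand" else String.ofList r.2.2

-- ===== PORT B =====
-- Source B's loop body: state (p pending backslashes, out, alpha, chg)
def pvStepB (st : Nat × List Char × Int × Int) (c : Char) : Nat × List Char × Int × Int :=
  let p := st.1; let out := st.2.1; let alpha := st.2.2.1; let chg := st.2.2.2
  if c = '\\' then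
    if p = 2 then (p, out ++ ['\\'], alpha, chg) else (p + 1, out, alpha, chg)
  else if c = '\'' ∧ p > 0 then
    (0, out ++ [if p = 2 then 'w' else 'v'], alpha + 1, chg + 1)
  else
    let out2 := out ++ List.replicate p '\\'   -- out.extend('\\' * p)
    match pvRules.get? (String.ofList [c]) with
    | some v => (0, out2 ++ v.toList, alpha + 1, chg + 1)
    | none =>
      if PySem.Chars.islower c then (0, out2 ++ [c], alpha + 1, chg)
      else (0, out2 ++ [c], alpha, chg)

def process_word_alt (word : String) : String :=
  let st := word.toList.foldl pvStepB (0, [], 0, 0)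
  if st.2.2.1 > 0 ∧ 2 * st.2.2.2 ≥ st.2.2.1 then "I don't understand"
  else String.ofList (st.2.1 ++ List.replicate st.1 '\\')   -- final flush of pending backslashes

-- ===== PRECONDITION & SPEC =====
def Spec_process_word (word : String) (out : String) : Prop := out = process_word_alt word
instance (word : String) (out : String) : Decidable (Spec_process_word word out) := by unfold Spec_process_word; infer_instance

-- ===== CLAIM (what is proved, stated in full; the proofs are below) =====
def Claim_equal_process_word : Prop := ∀ (word : String), Dom_process_word word → Spec_process_word word (process_word word)

-- ===== LEMMAS AND PROOFS =====

theorem pvLoopA_single (l : List Char) (c : Char) (h1 : c ≠ '\\') : pvLoopA (c :: l) =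
    (let r := pvLoopA l
     match pvRules.get? (String.ofList [c]) with
     | some v => (r.1 + 1, r.2.1 + 1, v.toList ++ r.2.2)
     | none =>
       if PySem.Chars.islower c then (r.1 + 1, r.2.1, c :: r.2.2)
       else (r.1, r.2.1, c :: r.2.2)) := by
  rw [pvLoopA.eq_def]
  split
  · simp_all
  · simp_all
  · rename_i heq; cases heq; rfl
  · simp_all

theorem pvLoopA_bs3 (l : List Char) : pvLoopA ('\\' :: '\\' :: '\\' :: l) =
    (let r := pvLoopA ('\\' :: '\\' :: l); (r.1, r.2.1, '\\' :: r.2.2)) := by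
  simp [pvLoopA, show pvRules.get? "\\" = none by decide,
        show PySem.Chars.islower '\\' = false by decide]

theorem pvLoopA_bs2_other (l : List Char) (c : Char) (_h1 : c ≠ '\\') (h2 : c ≠ '\'') :
    pvLoopA ('\\' :: '\\' :: c :: l) =
    (let r := pvLoopA ('\\' :: c :: l); (r.1, r.2.1, '\\' :: r.2.2)) := by
  rw [pvLoopA.eq_def]
  split
  · simp_all
  · simp_all
  · rename_i heq; cases heq
    simp [show pvRules.get? "\\" = none by decide,
          show PySem.Chars.islower '\\' = false by decide]
  · simp_all

theorem pvLoopA_bs1_other (l : List Char) (c : Char) (h1 : c ≠ '\\') (h2 : c ≠ '\'') :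
    pvLoopA ('\\' :: c :: l) =
    (let r := pvLoopA (c :: l); (r.1, r.2.1, '\\' :: r.2.2)) := by
  rw [pvLoopA.eq_def]
  split
  · simp_all
  · simp_all
  · rename_i heq; cases heq
    simp [show pvRules.get? "\\" = none by decide,
          show PySem.Chars.islower '\\' = false by decide]
  · simp_all

-- THE INVARIANT: running B's fold from pending-backslash state p equals running A's
-- scan on p literal backslashes prepended to the remaining input.
theorem pvInv (l : List Char) : ∀ (p : Nat) (out : List Char) (a c : Int), p ≤ 2 →
    (l.foldl pvStepB (p, out, a, c)).2.1
        ++ List.replicate (l.foldl pvStepB (p, out, a, c)).1 '\\'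
      = out ++ (pvLoopA (List.replicate p '\\' ++ l)).2.2
    ∧ (l.foldl pvStepB (p, out, a, c)).2.2.1 = a + (pvLoopA (List.replicate p '\\' ++ l)).1
    ∧ (l.foldl pvStepB (p, out, a, c)).2.2.2 = c + (pvLoopA (List.replicate p '\\' ++ l)).2.1 := by
  induction l with
  | nil =>
    intro p out a c hp
    interval_cases p <;> simp [pvLoopA] <;>
      simp [show pvRules.get? "\\" = none by decide,
            show PySem.Chars.islower '\\' = false by decide]
  | cons x l ih =>
    intro p out a c hp
    rw [List.foldl_cons]
    by_cases hx : x = '\\'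
    · subst hx
      by_cases hp2 : p = 2
      · subst hp2
        have hstep : pvStepB (2, out, a, c) '\\' = (2, out ++ ['\\'], a, c) := by
          simp [pvStepB]
        rw [hstep]
        have := ih 2 (out ++ ['\\']) a c (by omega)
        simpa [pvLoopA_bs3, List.append_assoc] using this
      · have hstep : pvStepB (p, out, a, c) '\\' = (p + 1, out, a, c) := by
          simp [pvStepB, hp2]
        rw [hstep]
        have hlist : List.replicate p '\\' ++ '\\' :: l = List.replicate (p + 1) '\\' ++ l := by
          simp [List.replicate_succ']
        rw [hlist]
        exact ih (p + 1) out a c (by omega)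
    · by_cases hq : x = '\'' ∧ p > 0
      · obtain ⟨hq1, hq2⟩ := hq
        subst hq1
        interval_cases p
        · have hstep : pvStepB (1, out, a, c) '\'' = (0, out ++ ['v'], a + 1, c + 1) := by
            simp [pvStepB]
          rw [hstep]
          obtain ⟨i1, i2, i3⟩ := ih 0 (out ++ ['v']) (a + 1) (c + 1) (by omega)
          simp only [List.replicate, List.nil_append] at i1 i2 i3
          refine ⟨?_, by simp [pvLoopA]; omega, by simp [pvLoopA]; omega⟩
          simp only [List.replicate]
          simp only [List.append_assoc, List.cons_append, List.nil_append] at i1 ⊢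
          exact i1
        · have hstep : pvStepB (2, out, a, c) '\'' = (0, out ++ ['w'], a + 1, c + 1) := by
            simp [pvStepB]
          rw [hstep]
          obtain ⟨i1, i2, i3⟩ := ih 0 (out ++ ['w']) (a + 1) (c + 1) (by omega)
          simp only [List.replicate, List.nil_append] at i1 i2 i3
          refine ⟨?_, by simp [pvLoopA]; omega, by simp [pvLoopA]; omega⟩
          simp only [List.replicate]
          simp only [List.append_assoc, List.cons_append, List.nil_append] at i1 ⊢
          exact i1
      · -- generic single character: flush the pending backslashes, then the same
        -- rules/islower branch on both sides
        have hstep : pvStepB (p, out, a, c) x =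
            (match pvRules.get? (String.ofList [x]) with
             | some v => (0, out ++ List.replicate p '\\' ++ v.toList, a + 1, c + 1)
             | none =>
               if PySem.Chars.islower x then (0, out ++ List.replicate p '\\' ++ [x], a + 1, c)
               else (0, out ++ List.replicate p '\\' ++ [x], a, c)) := by
          simp only [pvStepB, if_neg hx, if_neg hq]
        have hred : pvLoopA (List.replicate p '\\' ++ x :: l) =
            (let r := pvLoopA (x :: l); (r.1, r.2.1, List.replicate p '\\' ++ r.2.2)) := by
          interval_cases p
          · simp
          · have hxq : x ≠ '\'' := by intro h; exact hq ⟨h, by omega⟩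
            simp [pvLoopA_bs1_other _ _ hx hxq]
          · have hxq : x ≠ '\'' := by intro h; exact hq ⟨h, by omega⟩
            simp [pvLoopA_bs2_other _ _ hx hxq, pvLoopA_bs1_other _ _ hx hxq]
        rw [hstep, hred, pvLoopA_single _ _ hx]
        cases hget : pvRules.get? (String.ofList [x]) with
        | some v =>
          obtain ⟨i1, i2, i3⟩ := ih 0 (out ++ List.replicate p '\\' ++ v.toList) (a + 1) (c + 1) (by omega)
          simp only [List.replicate, List.nil_append] at i1 i2 i3
          simp only [List.append_assoc] at i1 i2 i3 ⊢
          exact ⟨i1, by omega, by omega⟩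
        | none =>
          by_cases hlow : PySem.Chars.islower x
          · simp only [hlow, if_true]
            obtain ⟨i1, i2, i3⟩ := ih 0 (out ++ List.replicate p '\\' ++ [x]) (a + 1) c (by omega)
            simp only [List.replicate, List.nil_append] at i1 i2 i3
            simp only [List.append_assoc, List.cons_append, List.nil_append] at i1 i2 i3 ⊢
            exact ⟨i1, by omega, by omega⟩
          · simp only [hlow, if_false, Bool.false_eq_true]
            obtain ⟨i1, i2, i3⟩ := ih 0 (out ++ List.replicate p '\\' ++ [x]) a c (by omega)
            simp only [List.replicate, List.nil_append] at i1 i2 i3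
            simp only [List.append_assoc, List.cons_append, List.nil_append] at i1 i2 i3 ⊢
            exact ⟨i1, by omega, by omega⟩

-- ===== VERDICT (by name: the statement is the Claim_ definition above) =====
theorem process_word_spec : Claim_equal_process_word := by
  intro word _
  unfold Spec_process_word process_word process_word_alt
  obtain ⟨hout, h2, h3⟩ := pvInv word.toList 0 [] 0 0 (by omega)
  simp only [List.replicate, List.nil_append] at hout h2 h3
  simp only [h2, h3, zero_add]
  by_cases hc : (pvLoopA word.toList).1 > 0 ∧ (pvLoopA word.toList).2.1 * 2 ≥ (pvLoopA word.toList).1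
  · rw [if_pos hc, if_pos ⟨hc.1, by have := hc.2; omega⟩]
  · rw [if_neg hc, if_neg (by intro h; exact hc ⟨h.1, by have := h.2; omega⟩)]
    simp [hout]
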